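-- pv_equiv track=rewrite | github.com/hossg/projecteuler | P043_Sub-string_Divisibility.py | generateTripletsDivisibleBy
-- ===== SOURCE A (Python) =====
-- def generateTripletsDivisibleBy(n):
--     triplets=[]
--     for i in range(10,1000):
--         s=str(i).zfill(3)
--         if s[0] != s[1] and s[0] != s[2] and s[1] != s[2]:
--             if(int(s)%n==0):
--                 triplets.append(s)
--     return triplets
-- ===== SOURCE B (Python) =====
-- def generateTripletsDivisibleBy(n):
--     digits = "0123456789"
--     out = []
--     for a in digits:
--         for b in digits:
--             if b == a:
--                 continue
--             for c in digits:
--                 if c == a or c == b: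
--                     continue
--                 v = ((ord(a) - 48) * 10 + (ord(b) - 48)) * 10 + (ord(c) - 48)
--                 if v % n == 0:
--                     out.append(a + b + c)
--     return out
-- ===== Notes on version B (the rewrite author's own statement) =====
-- stated objective: idiomatic
-- what changed: B enumerates the distinct-digit triples directly via three nested loops over the digit characters (a permutation-style enumeration) instead of scanning all integers 10..999, zero-padding each and testing digit distinctness on the rendered string.
-- outside the precondition, e.g. on generateTripletsDivisibleBy(0): A raises ZeroDivisionError, B raises ZeroDivisionError
import Mathlib
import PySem

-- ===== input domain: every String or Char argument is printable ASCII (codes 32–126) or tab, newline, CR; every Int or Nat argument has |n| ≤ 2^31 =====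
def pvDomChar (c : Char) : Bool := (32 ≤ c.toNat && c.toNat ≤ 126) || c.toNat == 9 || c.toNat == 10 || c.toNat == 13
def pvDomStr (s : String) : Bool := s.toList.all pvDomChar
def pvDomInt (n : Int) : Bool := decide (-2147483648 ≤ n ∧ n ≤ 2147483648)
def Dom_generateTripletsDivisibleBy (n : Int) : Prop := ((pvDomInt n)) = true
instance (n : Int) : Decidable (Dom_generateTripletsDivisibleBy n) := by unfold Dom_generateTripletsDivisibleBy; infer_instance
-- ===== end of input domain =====

-- B enumerates the 720 distinct-digit triples directly by three nested loops over the
-- digit characters (no integer range scan, no zfill, no per-candidate distinctness test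
-- on a rendered string); objective: idiomatic/alternative enumeration, same output.

-- ===== PORT A =====
def generateTripletsDivisibleBy (n : Int) : List String :=
  (PySem.List.pyRange 10 1000 1).foldl (fun triplets i =>
    let s := PySem.Str.zfill (PySem.Int.toStr i) 3
    if PySem.Str.pyGet? s 0 ≠ PySem.Str.pyGet? s 1 ∧
       PySem.Str.pyGet? s 0 ≠ PySem.Str.pyGet? s 2 ∧
       PySem.Str.pyGet? s 1 ≠ PySem.Str.pyGet? s 2 then
      -- int(s): PySem.Int.ofStr? always returns `some` here (s is three ASCII digits)
      match PySem.Int.ofStr? s with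
      | some v => if PySem.Int.mod v n == 0 then triplets ++ [s] else triplets
      | none => triplets
    else triplets) []

-- ===== PORT B =====
def generateTripletsDivisibleBy_alt (n : Int) : List String :=
  let digits := "0123456789".toList
  digits.foldl (fun out a =>
    digits.foldl (fun out b =>
      if b == a then out
      else
        digits.foldl (fun out c =>
          if c == a || c == b then out
          else
            let v : Int := (((a.toNat : Int) - 48) * 10 + ((b.toNat : Int) - 48)) * 10
                             + ((c.toNat : Int) - 48)
            if PySem.Int.mod v n == 0 then out ++ [String.ofList [a, b, c]] else out) out) out) []

-- ===== PRECONDITION & SPEC =====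
-- Pre_ excludes exactly n = 0, where Python A (and B) raise ZeroDivisionError on the
-- first distinct-digit candidate.
def Pre_generateTripletsDivisibleBy (n : Int) : Prop := n ≠ 0
instance (n : Int) : Decidable (Pre_generateTripletsDivisibleBy n) := by
  unfold Pre_generateTripletsDivisibleBy; infer_instance
def pvWitness_generateTripletsDivisibleBy : Int := 7
def Spec_generateTripletsDivisibleBy (n : Int) (out : List String) : Prop := out = generateTripletsDivisibleBy_alt n
instance (n : Int) (out : List String) : Decidable (Spec_generateTripletsDivisibleBy n out) := by unfold Spec_generateTripletsDivisibleBy; infer_instance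

-- ===== CLAIM (what is proved, stated in full; the proofs are below) =====
def Claim_equal_generateTripletsDivisibleBy : Prop := ∀ (n : Int), Dom_generateTripletsDivisibleBy n → Pre_generateTripletsDivisibleBy n → Spec_generateTripletsDivisibleBy n (generateTripletsDivisibleBy n)

-- ===== LEMMAS AND PROOFS =====

-- the n-independent candidate stream of A: (value, rendered string) per surviving i
def candA (i : Int) : Option (Int × String) :=
  let s := PySem.Str.zfill (PySem.Int.toStr i) 3
  if PySem.Str.pyGet? s 0 ≠ PySem.Str.pyGet? s 1 ∧
     PySem.Str.pyGet? s 0 ≠ PySem.Str.pyGet? s 2 ∧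
     PySem.Str.pyGet? s 1 ≠ PySem.Str.pyGet? s 2 then
    (PySem.Int.ofStr? s).map (fun v => (v, s))
  else none

-- the n-independent candidate stream of B's innermost loop
def candB (a b c : Char) : Option (Int × String) :=
  if c == a || c == b then none
  else some ((((a.toNat : Int) - 48) * 10 + ((b.toNat : Int) - 48)) * 10
               + ((c.toNat : Int) - 48), String.ofList [a, b, c])

-- keep the strings whose value is divisible by n
def pickDiv (n : Int) (L : List (Int × String)) : List String :=
  (L.filter (fun p => PySem.Int.mod p.1 n == 0)).map Prod.snd

def candListA : List (Int × String) := (PySem.List.pyRange 10 1000 1).filterMap candA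

def candListB : List (Int × String) :=
  "0123456789".toList.flatMap (fun a =>
    "0123456789".toList.flatMap (fun b =>
      if b == a then []
      else "0123456789".toList.filterMap (candB a b)))

lemma pickDiv_append (n : Int) (L1 L2 : List (Int × String)) :
    pickDiv n (L1 ++ L2) = pickDiv n L1 ++ pickDiv n L2 := by
  simp [pickDiv, List.filter_append]

lemma pickDiv_flatMap {α : Type} (n : Int) (h : α → List (Int × String)) (l : List α) :
    pickDiv n (l.flatMap h) = l.flatMap (fun x => pickDiv n (h x)) := by
  induction l with
  | nil => simp [pickDiv]
  | cons x xs ih => simp [List.flatMap_cons, pickDiv_append, ih]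

-- a foldl whose body appends the divisible candidates f produces pickDiv of filterMap f
lemma fold_pick {α : Type} (F : List String → α → List String)
    (f : α → Option (Int × String)) (n : Int)
    (hF : ∀ acc x, F acc x =
      match f x with
      | some p => if PySem.Int.mod p.1 n == 0 then acc ++ [p.2] else acc
      | none => acc) :
    ∀ (xs : List α) (acc : List String),
      xs.foldl F acc = acc ++ pickDiv n (xs.filterMap f) := by
  intro xs
  induction xs with
  | nil => intro acc; simp [pickDiv]
  | cons x xs ih =>
    intro acc
    rw [List.foldl_cons, ih, hF, List.filterMap_cons]
    cases h : f x with
    | none => simp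
    | some p =>
      by_cases hm : PySem.Int.mod p.1 n == 0
      · simp [hm, pickDiv, List.append_assoc]
      · simp [hm, pickDiv]

-- a foldl whose body appends g x equals flatMap g
lemma fold_flat {α : Type} (F : List String → α → List String) (g : α → List String)
    (hF : ∀ acc x, F acc x = acc ++ g x) :
    ∀ (xs : List α) (acc : List String),
      xs.foldl F acc = acc ++ xs.flatMap g := by
  intro xs
  induction xs with
  | nil => intro acc; simp
  | cons x xs ih => intro acc; rw [List.foldl_cons, ih, hF]; simp [List.flatMap_cons]

lemma A_eq (n : Int) : generateTripletsDivisibleBy n = pickDiv n candListA := by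
  unfold generateTripletsDivisibleBy candListA
  rw [fold_pick _ candA n]
  · simp
  · intro acc i
    simp only [candA]
    split
    · cases PySem.Int.ofStr? (PySem.Str.zfill (PySem.Int.toStr i) 3) <;> simp
    · rfl

lemma B_eq (n : Int) : generateTripletsDivisibleBy_alt n = pickDiv n candListB := by
  unfold generateTripletsDivisibleBy_alt candListB
  rw [fold_flat _ (fun a => "0123456789".toList.flatMap (fun b =>
        if b == a then [] else pickDiv n ("0123456789".toList.filterMap (candB a b))))]
  · rw [List.nil_append, pickDiv_flatMap]
    refine List.flatMap_congr (fun a _ => ?_)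
    rw [pickDiv_flatMap]
    refine List.flatMap_congr (fun b _ => ?_)
    by_cases h : b == a <;> simp [h, pickDiv]
  · intro acc a
    rw [fold_flat _ (fun b => if b == a then []
          else pickDiv n ("0123456789".toList.filterMap (candB a b)))]
    intro acc' b
    by_cases h : b == a
    · simp [h]
    · simp only [h, if_false, Bool.false_eq_true]
      rw [fold_pick _ (candB a b) n]
      intro acc'' c
      simp only [candB]
      by_cases hc : c == a || c == b
      · simp [hc]
      · simp [hc]

set_option maxRecDepth 100000 in
set_option maxHeartbeats 1000000 in
lemma cand_lists_eq : candListA = candListB := by decide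

-- ===== VERDICT (by name: the statement is the Claim_ definition above) =====
theorem generateTripletsDivisibleBy_spec : Claim_equal_generateTripletsDivisibleBy := by
  intro n _ _
  unfold Spec_generateTripletsDivisibleBy
  rw [A_eq, B_eq, cand_lists_eq]
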